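-- pv_equiv track=rewrite | github.com/mdxvision/mdx-vision-enterprise | ehr-proxy/medical_vocabulary.py | detect_specialty_from_icd10
-- ===== SOURCE A (Python) =====
-- SPECIALTY_ICD10_PREFIXES = {
--     "cardiology": [
--         "I10", "I11", "I12", "I13",  # Hypertensive diseases
--         "I20", "I21", "I22", "I23", "I24", "I25",  # Ischemic heart diseases
--         "I26", "I27", "I28",  # Pulmonary heart disease (shared with pulm)
--         "I30", "I31", "I32", "I33", "I34", "I35", "I36", "I37", "I38", "I39",  # Other heart diseases
--         "I40", "I41", "I42", "I43", "I44", "I45", "I46", "I47", "I48", "I49", "I50", "I51", "I52",  # Cardiomyopathy, arrhythmia, heart failure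
--     ],
--     "pulmonology": [
--         "J00", "J01", "J02", "J03", "J04", "J05", "J06",  # Acute upper respiratory
--         "J09", "J10", "J11", "J12", "J13", "J14", "J15", "J16", "J17", "J18",  # Influenza and pneumonia
--         "J20", "J21", "J22",  # Acute lower respiratory
--         "J30", "J31", "J32", "J33", "J34", "J35", "J36", "J37", "J38", "J39",  # Other upper respiratory
--         "J40", "J41", "J42", "J43", "J44", "J45", "J46", "J47",  # Chronic lower respiratory (COPD, asthma)
--         "J60", "J61", "J62", "J63", "J64", "J65", "J66", "J67", "J68", "J69", "J70",  # Lung diseases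
--         "J80", "J81", "J82", "J84", "J85", "J86",  # Other respiratory diseases
--         "J90", "J91", "J92", "J93", "J94", "J95", "J96", "J98", "J99",  # Pleural, respiratory failure
--     ],
--     "orthopedics": [
--         "M00", "M01", "M02",  # Infectious arthropathies
--         "M05", "M06", "M07", "M08",  # Inflammatory polyarthropathies
--         "M10", "M11", "M12", "M13", "M14",  # Arthropathies
--         "M15", "M16", "M17", "M18", "M19",  # Arthrosis/osteoarthritis
--         "M20", "M21", "M22", "M23", "M24", "M25",  # Joint disorders
--         "M40", "M41", "M42", "M43",  # Deforming dorsopathies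
--         "M45", "M46", "M47", "M48", "M49",  # Spondylopathies
--         "M50", "M51", "M53", "M54",  # Other dorsopathies
--         "M60", "M61", "M62", "M63",  # Muscle disorders
--         "M65", "M66", "M67",  # Synovium and tendon disorders
--         "M70", "M71", "M72", "M75", "M76", "M77", "M79",  # Soft tissue disorders
--         "M80", "M81", "M83", "M84", "M85",  # Bone density and structure
--         "S42", "S52", "S62", "S72", "S82", "S92",  # Fractures
--         "S43", "S53", "S63", "S73", "S83", "S93",  # Dislocations
--     ],
--     "neurology": [
--         "G00", "G01", "G02", "G03", "G04", "G05", "G06", "G07", "G08", "G09",  # CNS inflammatory diseases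
--         "G10", "G11", "G12", "G13",  # Systemic atrophies
--         "G20", "G21", "G23", "G24", "G25", "G26",  # Extrapyramidal/movement disorders (Parkinson's)
--         "G30", "G31", "G32",  # Other degenerative (Alzheimer's)
--         "G35", "G36", "G37",  # Demyelinating diseases (MS)
--         "G40", "G41", "G43", "G44", "G45", "G46", "G47",  # Episodic/paroxysmal (epilepsy, migraine, TIA)
--         "G50", "G51", "G52", "G53", "G54", "G55", "G56", "G57", "G58", "G59",  # Nerve disorders
--         "G60", "G61", "G62", "G63", "G64", "G65",  # Polyneuropathies
--         "G70", "G71", "G72", "G73",  # Neuromuscular junction diseases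
--         "G80", "G81", "G82", "G83",  # Cerebral palsy and paralytic syndromes
--         "G89", "G90", "G91", "G92", "G93", "G94", "G95", "G96", "G97", "G98", "G99",  # Other CNS disorders
--         "I60", "I61", "I62", "I63", "I64", "I65", "I66", "I67", "I68", "I69",  # Cerebrovascular diseases (stroke)
--     ],
--     "pediatrics": [
--         "P00", "P01", "P02", "P03", "P04", "P05", "P07", "P08",  # Perinatal conditions
--         "P10", "P11", "P12", "P13", "P14", "P15",  # Birth trauma
--         "P20", "P21", "P22", "P23", "P24", "P25", "P26", "P27", "P28", "P29",  # Respiratory/cardiovascular perinatal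
--         "P35", "P36", "P37", "P38", "P39",  # Perinatal infections
--         "P50", "P51", "P52", "P53", "P54", "P55", "P56", "P57", "P58", "P59",  # Perinatal hemorrhagic/hematologic
--         "P70", "P71", "P72", "P74", "P76", "P77", "P78",  # Perinatal endocrine/digestive
--         "P80", "P81", "P83", "P84",  # Other perinatal conditions
--         "P90", "P91", "P92", "P93", "P94", "P95", "P96",  # Other perinatal disorders
--         "Q00", "Q01", "Q02", "Q03", "Q04", "Q05", "Q06", "Q07",  # Congenital malformations CNS
--         "Z00.1",  # Well child examination
--     ],
-- }
--
-- def detect_specialty_from_icd10(icd10_code: str) -> list: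
--     """
--     Detect medical specialties from an ICD-10 code.
--
--     Args:
--         icd10_code: ICD-10 diagnosis code (e.g., "I10", "J44.1")
--
--     Returns:
--         List of detected specialties
--     """
--     if not icd10_code:
--         return []
--
--     code_upper = icd10_code.upper().strip()
--     detected = []
--
--     for specialty, prefixes in SPECIALTY_ICD10_PREFIXES.items():
--         for prefix in prefixes:
--             if code_upper.startswith(prefix):
--                 if specialty not in detected:
--                     detected.append(specialty)
--                 break
--
--     return detected
-- ===== SOURCE B (Python) =====
-- # The prefix table compiles down to (letter, two-digit-number) range intervals:
-- # every prefix except "Z00.1" is a letter followed by two digits, and prefixes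
-- # are disjoint across specialties, so at most one specialty can match.
-- RANGES = {
--     "I": [(10, 13, "cardiology"), (20, 28, "cardiology"), (30, 52, "cardiology"),
--           (60, 69, "neurology")],
--     "J": [(0, 6, "pulmonology"), (9, 18, "pulmonology"), (20, 22, "pulmonology"),
--           (30, 47, "pulmonology"), (60, 70, "pulmonology"), (80, 82, "pulmonology"),
--           (84, 86, "pulmonology"), (90, 96, "pulmonology"), (98, 99, "pulmonology")],
--     "M": [(0, 2, "orthopedics"), (5, 8, "orthopedics"), (10, 25, "orthopedics"),
--           (40, 43, "orthopedics"), (45, 51, "orthopedics"), (53, 54, "orthopedics"),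
--           (60, 63, "orthopedics"), (65, 67, "orthopedics"), (70, 72, "orthopedics"),
--           (75, 77, "orthopedics"), (79, 81, "orthopedics"), (83, 85, "orthopedics")],
--     "S": [(42, 43, "orthopedics"), (52, 53, "orthopedics"), (62, 63, "orthopedics"),
--           (72, 73, "orthopedics"), (82, 83, "orthopedics"), (92, 93, "orthopedics")],
--     "G": [(0, 13, "neurology"), (20, 21, "neurology"), (23, 26, "neurology"),
--           (30, 32, "neurology"), (35, 37, "neurology"), (40, 41, "neurology"),
--           (43, 47, "neurology"), (50, 65, "neurology"), (70, 73, "neurology"),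
--           (80, 83, "neurology"), (89, 99, "neurology")],
--     "P": [(0, 5, "pediatrics"), (7, 8, "pediatrics"), (10, 15, "pediatrics"),
--           (20, 29, "pediatrics"), (35, 39, "pediatrics"), (50, 59, "pediatrics"),
--           (70, 72, "pediatrics"), (74, 74, "pediatrics"), (76, 78, "pediatrics"),
--           (80, 81, "pediatrics"), (83, 84, "pediatrics"), (90, 96, "pediatrics")],
--     "Q": [(0, 7, "pediatrics")],
-- }
--
--
-- def detect_specialty_from_icd10(icd10_code: str) -> list:
--     """Detect medical specialties from an ICD-10 code (numeric-range version)."""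
--     if not icd10_code:
--         return []
--
--     code = icd10_code.upper().strip()
--
--     if code[:5] == "Z00.1":
--         return ["pediatrics"]
--
--     if len(code) < 3 or not code[1:3].isdigit():
--         return []
--
--     n = int(code[1:3])
--     for lo, hi, specialty in RANGES.get(code[0], []):
--         if lo <= n <= hi:
--             return [specialty]
--     return []
-- ===== Notes on version B (the rewrite author's own statement) =====
-- stated objective: alternative
-- what changed: B discards the ~300-entry prefix-string table: it parses the normalized code once into (letter, two-digit number) and checks the number against per-letter interval ranges (plus the single literal 'Z00.1' case), instead of A's startswith scan over every prefix of every specialty.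
import Mathlib
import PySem

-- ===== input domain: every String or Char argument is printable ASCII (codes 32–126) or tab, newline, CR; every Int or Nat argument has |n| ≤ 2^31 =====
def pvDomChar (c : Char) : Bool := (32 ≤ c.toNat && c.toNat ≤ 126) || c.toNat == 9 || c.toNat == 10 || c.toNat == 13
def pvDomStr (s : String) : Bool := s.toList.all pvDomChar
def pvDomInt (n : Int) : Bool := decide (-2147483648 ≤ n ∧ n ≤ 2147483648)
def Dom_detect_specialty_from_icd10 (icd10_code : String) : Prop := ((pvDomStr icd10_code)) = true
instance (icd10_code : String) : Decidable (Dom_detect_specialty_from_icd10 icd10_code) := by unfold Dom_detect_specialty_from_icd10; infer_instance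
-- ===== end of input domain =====

-- B replaces A's scan of every prefix string of every specialty by numeric range
-- intervals: every prefix except "Z00.1" is a letter plus two digits, so B parses
-- the code once and checks the two-digit number against per-letter intervals.

-- ===== PORT A =====
-- SPECIALTY_ICD10_PREFIXES as an insertion-ordered association list
def spData : List (String × List String) :=
  [("cardiology",
    ["I10", "I11", "I12", "I13",
     "I20", "I21", "I22", "I23", "I24", "I25",
     "I26", "I27", "I28",
     "I30", "I31", "I32", "I33", "I34", "I35", "I36", "I37", "I38", "I39",
     "I40", "I41", "I42", "I43", "I44", "I45", "I46", "I47", "I48", "I49", "I50", "I51", "I52"]),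
   ("pulmonology",
    ["J00", "J01", "J02", "J03", "J04", "J05", "J06",
     "J09", "J10", "J11", "J12", "J13", "J14", "J15", "J16", "J17", "J18",
     "J20", "J21", "J22",
     "J30", "J31", "J32", "J33", "J34", "J35", "J36", "J37", "J38", "J39",
     "J40", "J41", "J42", "J43", "J44", "J45", "J46", "J47",
     "J60", "J61", "J62", "J63", "J64", "J65", "J66", "J67", "J68", "J69", "J70",
     "J80", "J81", "J82", "J84", "J85", "J86",
     "J90", "J91", "J92", "J93", "J94", "J95", "J96", "J98", "J99"]),
   ("orthopedics",
    ["M00", "M01", "M02",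
     "M05", "M06", "M07", "M08",
     "M10", "M11", "M12", "M13", "M14",
     "M15", "M16", "M17", "M18", "M19",
     "M20", "M21", "M22", "M23", "M24", "M25",
     "M40", "M41", "M42", "M43",
     "M45", "M46", "M47", "M48", "M49",
     "M50", "M51", "M53", "M54",
     "M60", "M61", "M62", "M63",
     "M65", "M66", "M67",
     "M70", "M71", "M72", "M75", "M76", "M77", "M79",
     "M80", "M81", "M83", "M84", "M85",
     "S42", "S52", "S62", "S72", "S82", "S92",
     "S43", "S53", "S63", "S73", "S83", "S93"]),
   ("neurology",
    ["G00", "G01", "G02", "G03", "G04", "G05", "G06", "G07", "G08", "G09",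
     "G10", "G11", "G12", "G13",
     "G20", "G21", "G23", "G24", "G25", "G26",
     "G30", "G31", "G32",
     "G35", "G36", "G37",
     "G40", "G41", "G43", "G44", "G45", "G46", "G47",
     "G50", "G51", "G52", "G53", "G54", "G55", "G56", "G57", "G58", "G59",
     "G60", "G61", "G62", "G63", "G64", "G65",
     "G70", "G71", "G72", "G73",
     "G80", "G81", "G82", "G83",
     "G89", "G90", "G91", "G92", "G93", "G94", "G95", "G96", "G97", "G98", "G99",
     "I60", "I61", "I62", "I63", "I64", "I65", "I66", "I67", "I68", "I69"]),
   ("pediatrics",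
    ["P00", "P01", "P02", "P03", "P04", "P05", "P07", "P08",
     "P10", "P11", "P12", "P13", "P14", "P15",
     "P20", "P21", "P22", "P23", "P24", "P25", "P26", "P27", "P28", "P29",
     "P35", "P36", "P37", "P38", "P39",
     "P50", "P51", "P52", "P53", "P54", "P55", "P56", "P57", "P58", "P59",
     "P70", "P71", "P72", "P74", "P76", "P77", "P78",
     "P80", "P81", "P83", "P84",
     "P90", "P91", "P92", "P93", "P94", "P95", "P96",
     "Q00", "Q01", "Q02", "Q03", "Q04", "Q05", "Q06", "Q07",
     "Z00.1"])]

-- for prefix in prefixes: if startswith: (append if new); break   ≡  any prefix matches → append if new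
def detect_specialty_from_icd10 (icd10_code : String) : List String :=
  if icd10_code = "" then []
  else
    let code_upper := PySem.Str.strip (PySem.Str.upper icd10_code)
    spData.foldl (fun detected sp =>
      if sp.2.any (fun p => PySem.Str.startswith code_upper p) then
        if detected.contains sp.1 then detected else detected ++ [sp.1]
      else detected) []

-- ===== PORT B =====
-- RANGES: letter -> list of (lo, hi, specialty) two-digit intervals
def rangesTable : List (Char × List (Int × Int × String)) :=
    [('I', [(10, 13, "cardiology"), (20, 28, "cardiology"), (30, 52, "cardiology"),
            (60, 69, "neurology")]),
     ('J', [(0, 6, "pulmonology"), (9, 18, "pulmonology"), (20, 22, "pulmonology"),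
            (30, 47, "pulmonology"), (60, 70, "pulmonology"), (80, 82, "pulmonology"),
            (84, 86, "pulmonology"), (90, 96, "pulmonology"), (98, 99, "pulmonology")]),
     ('M', [(0, 2, "orthopedics"), (5, 8, "orthopedics"), (10, 25, "orthopedics"),
            (40, 43, "orthopedics"), (45, 51, "orthopedics"), (53, 54, "orthopedics"),
            (60, 63, "orthopedics"), (65, 67, "orthopedics"), (70, 72, "orthopedics"),
            (75, 77, "orthopedics"), (79, 81, "orthopedics"), (83, 85, "orthopedics")]),
     ('S', [(42, 43, "orthopedics"), (52, 53, "orthopedics"), (62, 63, "orthopedics"),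
            (72, 73, "orthopedics"), (82, 83, "orthopedics"), (92, 93, "orthopedics")]),
     ('G', [(0, 13, "neurology"), (20, 21, "neurology"), (23, 26, "neurology"),
            (30, 32, "neurology"), (35, 37, "neurology"), (40, 41, "neurology"),
            (43, 47, "neurology"), (50, 65, "neurology"), (70, 73, "neurology"),
            (80, 83, "neurology"), (89, 99, "neurology")]),
     ('P', [(0, 5, "pediatrics"), (7, 8, "pediatrics"), (10, 15, "pediatrics"),
            (20, 29, "pediatrics"), (35, 39, "pediatrics"), (50, 59, "pediatrics"),
            (70, 72, "pediatrics"), (74, 74, "pediatrics"), (76, 78, "pediatrics"),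
            (80, 81, "pediatrics"), (83, 84, "pediatrics"), (90, 96, "pediatrics")]),
     ('Q', [(0, 7, "pediatrics")])]

def rangesDict : PySem.Dict Char (List (Int × Int × String)) := PySem.Dict.ofList rangesTable

-- for lo, hi, specialty in ...: if lo <= n <= hi: return [specialty]
def scanRanges (n : Int) : List (Int × Int × String) → List String
  | [] => []
  | (lo, hi, sp) :: rest => if lo ≤ n ∧ n ≤ hi then [sp] else scanRanges n rest

def detect_specialty_from_icd10_alt (icd10_code : String) : List String :=
  if icd10_code = "" then []
  else
    let code := PySem.Str.strip (PySem.Str.upper icd10_code)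
    if PySem.Str.slice code none (some 5) = "Z00.1" then ["pediatrics"]
    else if PySem.Str.len code < 3 || !PySem.Str.strIsdigit (PySem.Str.slice code (some 1) (some 3)) then []
    else
      -- n = int(code[1:3]); int() cannot fail here: code[1:3] is two ASCII digits
      let n := (PySem.Int.ofStr? (PySem.Str.slice code (some 1) (some 3))).getD 0
      match PySem.Str.pyGet? code 0 with      -- code[0]; in range since len(code) >= 3
      | none => []
      | some ch => scanRanges n (rangesDict.getD ch [])

-- ===== PRECONDITION & SPEC =====
def Spec_detect_specialty_from_icd10 (icd10_code : String) (out : List String) : Prop := out = detect_specialty_from_icd10_alt icd10_code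
instance (icd10_code : String) (out : List String) : Decidable (Spec_detect_specialty_from_icd10 icd10_code out) := by unfold Spec_detect_specialty_from_icd10; infer_instance

-- ===== CLAIM (what is proved, stated in full; the proofs are below) =====
def Claim_equal_detect_specialty_from_icd10 : Prop := ∀ (icd10_code : String), Dom_detect_specialty_from_icd10 icd10_code → Spec_detect_specialty_from_icd10 icd10_code (detect_specialty_from_icd10 icd10_code)

-- ===== LEMMAS AND PROOFS =====

-- all prefixes, flattened
def flatP : List String := spData.flatMap (fun x => x.2)

def lettersL : List Char := ['I', 'J', 'M', 'S', 'G', 'P', 'Q']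
def digitsL : List Char := ['0', '1', '2', '3', '4', '5', '6', '7', '8', '9']
def zl : List Char := ['Z', '0', '0', '.', '1']

-- A's filter predicate at char level: 3-char prefixes compared against x3,
-- the single 5-char prefix "Z00.1" replaced by the boolean z
def AfP (x3 : List Char) (z : Bool) : List String :=
  (spData.filter (fun sp =>
    sp.2.any (fun p => if p.toList.length = 3 then decide (p.toList = x3) else z))).map Prod.fst

def pTab : List (String × List (Option (Char × Char × Char))) :=
  [
   ("cardiology",
    [some ('I','1','0'), some ('I','1','1'), some ('I','1','2'), some ('I','1','3'), some ('I','2','0'), some ('I','2','1'), some ('I','2','2'), some ('I','2','3'), some ('I','2','4'), some ('I','2','5'), some ('I','2','6'), some ('I','2','7'), some ('I','2','8'), some ('I','3','0'), some ('I','3','1'), some ('I','3','2'), some ('I','3','3'), some ('I','3','4'), some ('I','3','5'), some ('I','3','6'), some ('I','3','7'), some ('I','3','8'), some ('I','3','9'), some ('I','4','0'), some ('I','4','1'), some ('I','4','2'), some ('I','4','3'), some ('I','4','4'), some ('I','4','5'), some ('I','4','6'), some ('I','4','7'), some ('I','4','8'), some ('I','4','9'), some ('I','5','0'), some ('I','5','1'),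 some ('I','5','2')]),
   ("pulmonology",
    [some ('J','0','0'), some ('J','0','1'), some ('J','0','2'), some ('J','0','3'), some ('J','0','4'), some ('J','0','5'), some ('J','0','6'), some ('J','0','9'), some ('J','1','0'), some ('J','1','1'), some ('J','1','2'), some ('J','1','3'), some ('J','1','4'), some ('J','1','5'), some ('J','1','6'), some ('J','1','7'), some ('J','1','8'), some ('J','2','0'), some ('J','2','1'), some ('J','2','2'), some ('J','3','0'), some ('J','3','1'), some ('J','3','2'), some ('J','3','3'), some ('J','3','4'), some ('J','3','5'), some ('J','3','6'), some ('J','3','7'), some ('J','3','8'), some ('J','3','9'), some ('J','4','0'), some ('J','4','1'), some ('J','4','2'), some ('J','4','3'), some ('J','4','4'), some ('J','4','5'), some ('J','4','6'), some ('J','4','7'), some ('J','6','0'), some ('J','6','1'), some ('J','6','2'), some ('J','6','3'), some ('J','6','4'), some ('J','6','5'), some ('J','6','6'), some ('J','6','7'), some ('J','6','8'), some ('J','6','9'), some ('J','7','0'), some ('J','8','0'), some ('J','8','1'), some ('J','8','2'), some ('J','8','4'), some ('J','8','5'), some ('J','8','6'), some ('J','9','0'), some ('J','9','1'), some ('J','9','2'),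 some ('J','9','3'), some ('J','9','4'), some ('J','9','5'), some ('J','9','6'), some ('J','9','8'), some ('J','9','9')]),
   ("orthopedics",
    [some ('M','0','0'), some ('M','0','1'), some ('M','0','2'), some ('M','0','5'), some ('M','0','6'), some ('M','0','7'), some ('M','0','8'), some ('M','1','0'), some ('M','1','1'), some ('M','1','2'), some ('M','1','3'), some ('M','1','4'), some ('M','1','5'), some ('M','1','6'), some ('M','1','7'), some ('M','1','8'), some ('M','1','9'), some ('M','2','0'), some ('M','2','1'), some ('M','2','2'), some ('M','2','3'), some ('M','2','4'), some ('M','2','5'), some ('M','4','0'), some ('M','4','1'), some ('M','4','2'), some ('M','4','3'), some ('M','4','5'), some ('M','4','6'), some ('M','4','7'), some ('M','4','8'), some ('M','4','9'), some ('M','5','0'), some ('M','5','1'), some ('M','5','3'), some ('M','5','4'), some ('M','6','0'), some ('M','6','1'), some ('M','6','2'), some ('M','6','3'), some ('M','6','5'), some ('M','6','6'), some ('M','6','7'), some ('M','7','0'), some ('M','7','1'), some ('M','7','2'), some ('M','7','5'), some ('M','7','6'), some ('M','7','7'), some ('M','7','9'), some ('M','8','0'), some ('M','8','1'), some ('M','8','3'),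 some ('M','8','4'), some ('M','8','5'), some ('S','4','2'), some ('S','5','2'), some ('S','6','2'), some ('S','7','2'), some ('S','8','2'), some ('S','9','2'), some ('S','4','3'), some ('S','5','3'), some ('S','6','3'), some ('S','7','3'), some ('S','8','3'), some ('S','9','3')]),
   ("neurology",
    [some ('G','0','0'), some ('G','0','1'), some ('G','0','2'), some ('G','0','3'), some ('G','0','4'), some ('G','0','5'), some ('G','0','6'), some ('G','0','7'), some ('G','0','8'), some ('G','0','9'), some ('G','1','0'), some ('G','1','1'), some ('G','1','2'), some ('G','1','3'), some ('G','2','0'), some ('G','2','1'), some ('G','2','3'), some ('G','2','4'), some ('G','2','5'), some ('G','2','6'), some ('G','3','0'), some ('G','3','1'), some ('G','3','2'), some ('G','3','5'), some ('G','3','6'), some ('G','3','7'), some ('G','4','0'), some ('G','4','1'), some ('G','4','3'), some ('G','4','4'), some ('G','4','5'), some ('G','4','6'), some ('G','4','7'), some ('G','5','0'), some ('G','5','1'), some ('G','5','2'), some ('G','5','3'), some ('G','5','4'), some ('G','5','5'), some ('G','5','6'), some ('G','5','7'), some ('G','5','8'), some ('G','5','9'), some ('G','6','0'), some ('G','6','1'),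 some ('G','6','2'), some ('G','6','3'), some ('G','6','4'), some ('G','6','5'), some ('G','7','0'), some ('G','7','1'), some ('G','7','2'), some ('G','7','3'), some ('G','8','0'), some ('G','8','1'), some ('G','8','2'), some ('G','8','3'), some ('G','8','9'), some ('G','9','0'), some ('G','9','1'), some ('G','9','2'), some ('G','9','3'), some ('G','9','4'), some ('G','9','5'), some ('G','9','6'), some ('G','9','7'), some ('G','9','8'), some ('G','9','9'), some ('I','6','0'), some ('I','6','1'), some ('I','6','2'), some ('I','6','3'), some ('I','6','4'), some ('I','6','5'), some ('I','6','6'), some ('I','6','7'), some ('I','6','8'), some ('I','6','9')]),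
   ("pediatrics",
    [some ('P','0','0'), some ('P','0','1'), some ('P','0','2'), some ('P','0','3'), some ('P','0','4'), some ('P','0','5'), some ('P','0','7'), some ('P','0','8'), some ('P','1','0'), some ('P','1','1'), some ('P','1','2'), some ('P','1','3'), some ('P','1','4'), some ('P','1','5'), some ('P','2','0'), some ('P','2','1'), some ('P','2','2'), some ('P','2','3'), some ('P','2','4'), some ('P','2','5'), some ('P','2','6'), some ('P','2','7'), some ('P','2','8'), some ('P','2','9'), some ('P','3','5'), some ('P','3','6'), some ('P','3','7'), some ('P','3','8'), some ('P','3','9'), some ('P','5','0'), some ('P','5','1'), some ('P','5','2'), some ('P','5','3'), some ('P','5','4'), some ('P','5','5'), some ('P','5','6'), some ('P','5','7'), some ('P','5','8'), some ('P','5','9'), some ('P','7','0'), some ('P','7','1'), some ('P','7','2'), some ('P','7','4'), some ('P','7','6'), some ('P','7','7'), some ('P','7','8'), some ('P','8','0'), some ('P','8','1'), some ('P','8','3'), some ('P','8','4'), some ('P','9','0'), some ('P','9','1'), some ('P','9','2'), some ('P','9','3'), some ('P','9','4'), some ('P','9','5'), some ('P','9','6'), some ('Q','0','0'), some ('Q','0','1'),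 some ('Q','0','2'), some ('Q','0','3'), some ('Q','0','4'), some ('Q','0','5'), some ('Q','0','6'), some ('Q','0','7'), none])]

-- AfP re-expressed over the char-coded table: letter a and two-digit value n
def nPred (a : Char) (n : Nat) : Option (Char × Char × Char) → Bool
  | none => false
  | some (x, y, z) => x == a && (10 * (y.toNat - 48) + (z.toNat - 48) == n)

def NfP (a : Char) (n : Nat) : List String :=
  (pTab.filter (fun sp => sp.2.any (nPred a n))).map Prod.fst

-- pTab codes spData: some (x,y,z) are the three chars of a prefix, none is "Z00.1"
def encB (p : String) (q : Option (Char × Char × Char)) : Bool :=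
  match q with
  | some (x, y, z) => p.toList == [x, y, z] && decide (x ∈ lettersL)
      && decide (y ∈ digitsL) && decide (z ∈ digitsL)
  | none => p.toList.length != 3

theorem keys_nodup : (spData.map Prod.fst).Nodup := by decide

set_option maxRecDepth 40000 in
theorem flat_shape : ∀ p ∈ flatP, p.toList.length = 3 ∨ p = "Z00.1" := by decide

set_option maxRecDepth 40000 in
theorem flat_chars : ∀ p ∈ flatP,
    (match p.toList with
     | [x, y, z] => PySem.Chars.isdigit y && PySem.Chars.isdigit z && decide (x ∈ lettersL)
     | _ => true) = true := by decide

set_option maxRecDepth 40000 in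
theorem enc_ok : List.Forall₂ (fun (sp : String × List String) spc =>
    sp.1 = spc.1 ∧ List.Forall₂ (fun p q => encB p q = true) sp.2 spc.2) spData pTab := by decide

theorem digit_bounds_all : (digitsL.all fun c => decide (48 ≤ c.toNat ∧ c.toNat ≤ 57)) = true := by rfl

theorem digit_bounds (c : Char) (h : c ∈ digitsL) : 48 ≤ c.toNat ∧ c.toNat ≤ 57 :=
  of_decide_eq_true (List.all_eq_true.mp digit_bounds_all c h)

theorem digit_mem (c : Char) (h : PySem.Chars.isdigit c = true) : c ∈ digitsL := by
  unfold PySem.Chars.isdigit at h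
  simp only [Bool.and_eq_true, decide_eq_true_eq] at h
  obtain ⟨h1, h2⟩ := h
  have g1 : 48 ≤ c.toNat := h1
  have g2 : c.toNat ≤ 57 := h2
  have hc := Char.ofNat_toNat c
  interval_cases h3 : c.toNat <;> rw [← hc] <;> decide

theorem char_eq_of_toNat (x y : Char) (h : x.toNat = y.toNat) : x = y := by
  have hx := Char.ofNat_toNat x
  have hy := Char.ofNat_toNat y
  rw [← hx, ← hy, h]

-- A's fold with break ≡ filter + map (invariant: nothing already collected recurs)
theorem foldA : ∀ (data : List (String × List String)) (det : List String)
    (q : String × List String → Bool),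
    (data.map Prod.fst).Nodup → (∀ sp ∈ data, det.contains sp.1 = false) →
    data.foldl (fun detected sp =>
        if q sp then
          if detected.contains sp.1 then detected else detected ++ [sp.1]
        else detected) det
      = det ++ ((data.filter q).map Prod.fst) := by
  intro data
  induction data with
  | nil => intro det q _ _; simp
  | cons a rest ih =>
    intro det q hnod hdis
    rw [List.map_cons, List.nodup_cons] at hnod
    obtain ⟨hafst, hrest⟩ := hnod
    rw [List.foldl_cons]
    cases hq : q a with
    | false =>
      rw [if_neg (by simp)]
      rw [ih det q hrest (fun sp h => hdis sp (List.mem_cons_of_mem _ h))]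
      simp [hq]
    | true =>
      rw [if_pos (by simp), hdis a List.mem_cons_self]
      rw [if_neg (by simp)]
      rw [ih (det ++ [a.1]) q hrest ?_]
      · simp [hq]
      · intro sp hsp
        have hne : sp.1 ≠ a.1 := by
          intro hcontra
          exact hafst (hcontra ▸ List.mem_map_of_mem hsp)
        simp [List.contains_eq_mem, List.mem_append, hne,
          decide_eq_false_iff_not]
        intro hmem
        have := hdis sp (List.mem_cons_of_mem _ hsp)
        simp [List.contains_eq_mem, decide_eq_false_iff_not] at this
        exact this hmem

theorem any_congr_mem {α : Type} (l : List α) (p q : α → Bool)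
    (h : ∀ x ∈ l, p x = q x) : l.any p = l.any q := by
  induction l with
  | nil => rfl
  | cons x xs ih =>
    simp only [List.any_cons, h x List.mem_cons_self,
      ih (fun y hy => h y (List.mem_cons_of_mem _ hy))]

-- the startswith filter, char-level
theorem A_filter_eq (c : String) :
    ((spData.filter (fun sp => sp.2.any (fun p => PySem.Str.startswith c p))).map Prod.fst)
      = AfP (c.toList.take 3) (decide (c.toList.take 5 = zl)) := by
  unfold AfP
  congr 1
  apply List.filter_congr
  intro sp hsp
  apply any_congr_mem
  intro p hp
  have hpf : p ∈ flatP := List.mem_flatMap.mpr ⟨sp, hsp, hp⟩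
  rcases flat_shape p hpf with h3 | h5
  · rw [if_pos h3, Bool.eq_iff_iff, PySem.Str.startswith_eq, PySem.Chars.startswith_iff,
      List.prefix_iff_eq_take, h3]
    simp
  · subst h5
    rw [if_neg (by decide), Bool.eq_iff_iff, PySem.Str.startswith_eq, PySem.Chars.startswith_iff,
      List.prefix_iff_eq_take]
    rw [show "Z00.1".toList = zl from rfl]
    simp only [decide_eq_true_eq, show zl.length = 5 from rfl]
    exact eq_comm

theorem AfP_short (x3 : List Char) (h : x3.length < 3) : AfP x3 false = [] := by
  unfold AfP
  rw [List.filter_eq_nil_iff.mpr, List.map_nil]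
  intro sp _
  simp only [Bool.not_eq_true, List.any_eq_false]
  intro p _
  split_ifs with h3
  · simp only [decide_eq_false_iff_not]
    intro he
    rw [he] at h3
    omega
  · rfl

theorem AfP_nomatch (a b d : Char)
    (h : (PySem.Chars.isdigit b && PySem.Chars.isdigit d && decide (a ∈ lettersL)) = false) :
    AfP [a, b, d] false = [] := by
  unfold AfP
  rw [List.filter_eq_nil_iff.mpr, List.map_nil]
  intro sp hsp
  simp only [Bool.not_eq_true, List.any_eq_false]
  intro p hp
  split_ifs with h3
  · simp only [decide_eq_false_iff_not]
    intro he
    have hc := flat_chars p (List.mem_flatMap.mpr ⟨sp, hsp, hp⟩)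
    rw [he] at hc
    simp only [hc] at h
    cases h
  · rfl

set_option maxRecDepth 100000 in
theorem AfP_zcase : AfP ['Z', '0', '0'] true = ["pediatrics"] := by decide

-- pointwise: a coded prefix matches [a,b,d] iff letter and two-digit value match
theorem elemR (p : String) (q : Option (Char × Char × Char)) (h : encB p q = true)
    (a b d : Char) (hb : b ∈ digitsL) (hd : d ∈ digitsL) :
    (if p.toList.length = 3 then decide (p.toList = [a, b, d]) else false)
      = nPred a (10 * (b.toNat - 48) + (d.toNat - 48)) q := by
  rcases q with _ | ⟨x, y, z⟩
  · have hne : p.toList.length ≠ 3 := by simpa [encB] using h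
    rw [if_neg hne, nPred]
  · simp only [encB, Bool.and_eq_true, beq_iff_eq, decide_eq_true_eq] at h
    obtain ⟨⟨⟨hp, -⟩, hy⟩, hz⟩ := h
    rw [nPred, hp, if_pos (by rfl)]
    obtain ⟨hy1, hy2⟩ := digit_bounds y hy
    obtain ⟨hz1, hz2⟩ := digit_bounds z hz
    obtain ⟨hb1, hb2⟩ := digit_bounds b hb
    obtain ⟨hd1, hd2⟩ := digit_bounds d hd
    rw [Bool.eq_iff_iff]
    simp only [decide_eq_true_eq, Bool.and_eq_true, beq_iff_eq, List.cons.injEq, and_true]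
    constructor
    · rintro ⟨rfl, rfl, rfl⟩
      exact ⟨rfl, rfl⟩
    · rintro ⟨rfl, hnum⟩
      refine ⟨rfl, char_eq_of_toNat y b (by omega), char_eq_of_toNat z d (by omega)⟩

theorem anyR (bs : List String) (qs : List (Option (Char × Char × Char)))
    (h : List.Forall₂ (fun p q => encB p q = true) bs qs) (a b d : Char) (hb : b ∈ digitsL) (hd : d ∈ digitsL) :
    (bs.any fun p => if p.toList.length = 3 then decide (p.toList = [a, b, d]) else false)
      = qs.any (nPred a (10 * (b.toNat - 48) + (d.toNat - 48))) := by
  induction h with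
  | cons h1 h2 ih =>
    simp only [List.any_cons, ih, elemR _ _ h1 a b d hb hd]
  | nil => rfl

theorem outerR (L1 : List (String × List String))
    (L2 : List (String × List (Option (Char × Char × Char))))
    (h : List.Forall₂ (fun sp spc =>
      sp.1 = spc.1 ∧ List.Forall₂ (fun p q => encB p q = true) sp.2 spc.2) L1 L2)
    (a b d : Char) (hb : b ∈ digitsL) (hd : d ∈ digitsL) :
    ((L1.filter (fun sp => sp.2.any
        (fun p => if p.toList.length = 3 then decide (p.toList = [a, b, d]) else false))).map
      Prod.fst)
      = ((L2.filter (fun sp => sp.2.any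
          (nPred a (10 * (b.toNat - 48) + (d.toNat - 48))))).map Prod.fst) := by
  induction h with
  | cons h1 h2 ih =>
    simp only [List.filter_cons]
    rw [anyR _ _ h1.2 a b d hb hd]
    split
    · simp only [List.map_cons, h1.1, ih]
    · exact ih
  | nil => rfl

theorem AfP_eq_NfP (a b d : Char) (hb : b ∈ digitsL) (hd : d ∈ digitsL) :
    AfP [a, b, d] false = NfP a (10 * (b.toNat - 48) + (d.toNat - 48)) := by
  unfold AfP NfP
  exact outerR spData pTab enc_ok a b d hb hd

set_option maxRecDepth 40000 in
theorem ofd : (digitsL.all fun b => digitsL.all fun d =>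
    (PySem.Int.ofChars? [b, d]).getD 0
      == ((10 * (b.toNat - 48) + (d.toNat - 48) : Nat) : Int)) = true := by rfl

theorem ofd_val (b d : Char) (hb : b ∈ digitsL) (hd : d ∈ digitsL) :
    (PySem.Int.ofChars? [b, d]).getD 0
      = ((10 * (b.toNat - 48) + (d.toNat - 48) : Nat) : Int) := by
  exact eq_of_beq (List.all_eq_true.mp (List.all_eq_true.mp ofd b hb) d hd)

set_option maxRecDepth 100000 in
theorem getD_I : rangesDict.getD 'I' [] = [(10, 13, "cardiology"), (20, 28, "cardiology"), (30, 52, "cardiology"), (60, 69, "neurology")] := rfl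

set_option maxRecDepth 100000 in
theorem keyI : ((List.range 100).all fun n =>
    NfP 'I' n == scanRanges (n : Int) [(10, 13, "cardiology"), (20, 28, "cardiology"), (30, 52, "cardiology"), (60, 69, "neurology")]) = true := rfl

set_option maxRecDepth 100000 in
theorem getD_J : rangesDict.getD 'J' [] = [(0, 6, "pulmonology"), (9, 18, "pulmonology"), (20, 22, "pulmonology"), (30, 47, "pulmonology"), (60, 70, "pulmonology"), (80, 82, "pulmonology"), (84, 86, "pulmonology"), (90, 96, "pulmonology"), (98, 99, "pulmonology")] := rfl

set_option maxRecDepth 100000 in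
theorem keyJ : ((List.range 100).all fun n =>
    NfP 'J' n == scanRanges (n : Int) [(0, 6, "pulmonology"), (9, 18, "pulmonology"), (20, 22, "pulmonology"), (30, 47, "pulmonology"), (60, 70, "pulmonology"), (80, 82, "pulmonology"), (84, 86, "pulmonology"), (90, 96, "pulmonology"), (98, 99, "pulmonology")]) = true := rfl

set_option maxRecDepth 100000 in
theorem getD_M : rangesDict.getD 'M' [] = [(0, 2, "orthopedics"), (5, 8, "orthopedics"), (10, 25, "orthopedics"), (40, 43, "orthopedics"), (45, 51, "orthopedics"), (53, 54, "orthopedics"), (60, 63, "orthopedics"), (65, 67, "orthopedics"), (70, 72, "orthopedics"), (75, 77, "orthopedics"), (79, 81, "orthopedics"), (83, 85, "orthopedics")] := rfl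

set_option maxRecDepth 100000 in
theorem keyM : ((List.range 100).all fun n =>
    NfP 'M' n == scanRanges (n : Int) [(0, 2, "orthopedics"), (5, 8, "orthopedics"), (10, 25, "orthopedics"), (40, 43, "orthopedics"), (45, 51, "orthopedics"), (53, 54, "orthopedics"), (60, 63, "orthopedics"), (65, 67, "orthopedics"), (70, 72, "orthopedics"), (75, 77, "orthopedics"), (79, 81, "orthopedics"), (83, 85, "orthopedics")]) = true := rfl

set_option maxRecDepth 100000 in
theorem getD_S : rangesDict.getD 'S' [] = [(42, 43, "orthopedics"), (52, 53, "orthopedics"), (62, 63, "orthopedics"), (72, 73, "orthopedics"), (82, 83, "orthopedics"), (92, 93, "orthopedics")] := rfl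

set_option maxRecDepth 100000 in
theorem keyS : ((List.range 100).all fun n =>
    NfP 'S' n == scanRanges (n : Int) [(42, 43, "orthopedics"), (52, 53, "orthopedics"), (62, 63, "orthopedics"), (72, 73, "orthopedics"), (82, 83, "orthopedics"), (92, 93, "orthopedics")]) = true := rfl

set_option maxRecDepth 100000 in
theorem getD_G : rangesDict.getD 'G' [] = [(0, 13, "neurology"), (20, 21, "neurology"), (23, 26, "neurology"), (30, 32, "neurology"), (35, 37, "neurology"), (40, 41, "neurology"), (43, 47, "neurology"), (50, 65, "neurology"), (70, 73, "neurology"), (80, 83, "neurology"), (89, 99, "neurology")] := rfl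

set_option maxRecDepth 100000 in
theorem keyG : ((List.range 100).all fun n =>
    NfP 'G' n == scanRanges (n : Int) [(0, 13, "neurology"), (20, 21, "neurology"), (23, 26, "neurology"), (30, 32, "neurology"), (35, 37, "neurology"), (40, 41, "neurology"), (43, 47, "neurology"), (50, 65, "neurology"), (70, 73, "neurology"), (80, 83, "neurology"), (89, 99, "neurology")]) = true := rfl

set_option maxRecDepth 100000 in
theorem getD_P : rangesDict.getD 'P' [] = [(0, 5, "pediatrics"), (7, 8, "pediatrics"), (10, 15, "pediatrics"), (20, 29, "pediatrics"), (35, 39, "pediatrics"), (50, 59, "pediatrics"), (70, 72, "pediatrics"), (74, 74, "pediatrics"), (76, 78, "pediatrics"), (80, 81, "pediatrics"), (83, 84, "pediatrics"), (90, 96, "pediatrics")] := rfl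

set_option maxRecDepth 100000 in
theorem keyP : ((List.range 100).all fun n =>
    NfP 'P' n == scanRanges (n : Int) [(0, 5, "pediatrics"), (7, 8, "pediatrics"), (10, 15, "pediatrics"), (20, 29, "pediatrics"), (35, 39, "pediatrics"), (50, 59, "pediatrics"), (70, 72, "pediatrics"), (74, 74, "pediatrics"), (76, 78, "pediatrics"), (80, 81, "pediatrics"), (83, 84, "pediatrics"), (90, 96, "pediatrics")]) = true := rfl

set_option maxRecDepth 100000 in
theorem getD_Q : rangesDict.getD 'Q' [] = [(0, 7, "pediatrics")] := rfl

set_option maxRecDepth 100000 in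
theorem keyQ : ((List.range 100).all fun n =>
    NfP 'Q' n == scanRanges (n : Int) [(0, 7, "pediatrics")]) = true := rfl

theorem keyAll (a : Char) (ha : a ∈ lettersL) (n : Nat) (hn : n < 100) :
    NfP a n = scanRanges (n : Int) (rangesDict.getD a []) := by
  have hnm : n ∈ List.range 100 := List.mem_range.mpr hn
  fin_cases ha
  · rw [getD_I]; exact eq_of_beq (List.all_eq_true.mp keyI n hnm)
  · rw [getD_J]; exact eq_of_beq (List.all_eq_true.mp keyJ n hnm)
  · rw [getD_M]; exact eq_of_beq (List.all_eq_true.mp keyM n hnm)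
  · rw [getD_S]; exact eq_of_beq (List.all_eq_true.mp keyS n hnm)
  · rw [getD_G]; exact eq_of_beq (List.all_eq_true.mp keyG n hnm)
  · rw [getD_P]; exact eq_of_beq (List.all_eq_true.mp keyP n hnm)
  · rw [getD_Q]; exact eq_of_beq (List.all_eq_true.mp keyQ n hnm)

theorem nonletter_ranges (a : Char) (ha : a ∉ lettersL) : rangesDict.getD a [] = [] := by
  simp only [lettersL, List.mem_cons, not_or] at ha
  obtain ⟨h1, h2, h3, h4, h5, h6, h7, -⟩ := ha
  have ritems : rangesDict.items = rangesTable := by rfl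
  have b1 : ('I' == a) = false := by simp [Ne.symm h1]
  have b2 : ('J' == a) = false := by simp [Ne.symm h2]
  have b3 : ('M' == a) = false := by simp [Ne.symm h3]
  have b4 : ('S' == a) = false := by simp [Ne.symm h4]
  have b5 : ('G' == a) = false := by simp [Ne.symm h5]
  have b6 : ('P' == a) = false := by simp [Ne.symm h6]
  have b7 : ('Q' == a) = false := by simp [Ne.symm h7]
  simp [PySem.Dict.getD, PySem.Dict.get?, ritems, rangesTable, List.find?,
    b1, b2, b3, b4, b5, b6, b7]

-- the whole equivalence for the normalized code string
theorem core (c : String) (l : List Char) (htl : c.toList = l) :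
    AfP (l.take 3) (decide (l.take 5 = zl))
      = (if PySem.Str.slice c none (some 5) = "Z00.1" then ["pediatrics"]
         else if PySem.Str.len c < 3
             || !PySem.Str.strIsdigit (PySem.Str.slice c (some 1) (some 3)) then []
         else
           match PySem.Str.pyGet? c 0 with
           | none => []
           | some ch =>
               scanRanges ((PySem.Int.ofStr? (PySem.Str.slice c (some 1) (some 3))).getD 0)
                 (rangesDict.getD ch [])) := by
  have hz : (PySem.Str.slice c none (some 5) = "Z00.1") ↔ (l.take 5 = zl) := by
    rw [← String.toList_inj, PySem.Str.toList_slice, PySem.Chars.slice_eq_listSlice, htl]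
    simp [pysem, zl]
  have hlen : PySem.Str.len c = (l.length : Int) := by rw [PySem.Str.len_eq, htl]
  have hs13 : (PySem.Str.slice c (some 1) (some 3)).toList = (l.drop 1).take 2 := by
    rw [PySem.Str.toList_slice, PySem.Chars.slice_eq_listSlice, htl]
    simp [pysem]
  have hget0 : PySem.Str.pyGet? c 0 = PySem.Chars.pyGet? l 0 := by
    rw [PySem.Str.pyGet?_eq, htl]
  rcases l with _ | ⟨a, _ | ⟨b, _ | ⟨d, rest⟩⟩⟩
  · rw [if_neg (fun h => by simp [zl] at hz; exact hz h),
      if_pos (by rw [hlen]; simp)]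
    rw [decide_eq_false (by simp [zl])]
    exact AfP_short _ (by simp)
  · rw [if_neg (fun h => by simp [zl] at hz; exact hz h),
      if_pos (by rw [hlen]; simp)]
    rw [decide_eq_false (by simp [zl])]
    exact AfP_short _ (by simp)
  · rw [if_neg (fun h => by simp [zl] at hz; exact hz h),
      if_pos (by rw [hlen]; simp)]
    rw [decide_eq_false (by simp [zl])]
    exact AfP_short _ (by simp)
  · have htake3 : (a :: b :: d :: rest).take 3 = [a, b, d] := rfl
    rw [htake3]
    by_cases hz5 : (a :: b :: d :: rest).take 5 = zl
    · have habd : a = 'Z' ∧ b = '0' ∧ d = '0' := by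
        have : a :: b :: d :: rest.take 2 = zl := by simpa using hz5
        simp [zl] at this
        exact ⟨this.1, this.2.1, this.2.2.1⟩
      obtain ⟨rfl, rfl, rfl⟩ := habd
      rw [if_pos (hz.mpr hz5), decide_eq_true hz5]
      exact AfP_zcase
    · rw [if_neg (fun h => hz5 (hz.mp h)), decide_eq_false hz5]
      have hdig : PySem.Str.strIsdigit (PySem.Str.slice c (some 1) (some 3))
          = (PySem.Chars.isdigit b && PySem.Chars.isdigit d) := by
        rw [PySem.Str.strIsdigit_eq, hs13]
        simp [PySem.Chars.strIsdigit]
      by_cases hbd : (PySem.Chars.isdigit b && PySem.Chars.isdigit d) = true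
      · rw [if_neg (by rw [hdig, hbd, hlen]; simp; omega)]
        have hbd2 := hbd
        simp only [Bool.and_eq_true] at hbd2
        obtain ⟨hdb, hdd⟩ := hbd2
        have hb : b ∈ digitsL := digit_mem b hdb
        have hd : d ∈ digitsL := digit_mem d hdd
        have hn : (PySem.Int.ofStr? (PySem.Str.slice c (some 1) (some 3))).getD 0
            = ((10 * (b.toNat - 48) + (d.toNat - 48) : Nat) : Int) := by
          rw [show PySem.Str.slice c (some 1) (some 3) = String.ofList [b, d] by
            rw [← String.ofList_toList (s := PySem.Str.slice c (some 1) (some 3)), hs13]; rfl]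
          rw [PySem.Int.ofStr?_ofList]
          exact ofd_val b d hb hd
        rw [hget0, show PySem.Chars.pyGet? (a :: b :: d :: rest) 0 = some a by
          simp [PySem.Chars.pyGet?]]
        show AfP [a, b, d] false
          = scanRanges ((PySem.Int.ofStr? (PySem.Str.slice c (some 1) (some 3))).getD 0)
              (rangesDict.getD a [])
        rw [hn]
        by_cases hal : a ∈ lettersL
        · obtain ⟨hb1, hb2⟩ := digit_bounds b hb
          obtain ⟨hd1, hd2⟩ := digit_bounds d hd
          rw [AfP_eq_NfP a b d hb hd, keyAll a hal _ (by omega)]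
        · rw [AfP_nomatch a b d (by simp [hal]), nonletter_ranges a hal]
          rfl
      · have hbd' : (PySem.Chars.isdigit b && PySem.Chars.isdigit d) = false := by
          simpa using hbd
        rw [if_pos (by rw [hdig, hbd']; simp)]
        exact AfP_nomatch a b d (by rw [hbd']; rfl)

-- ===== VERDICT (by name: the statement is the Claim_ definition above) =====
theorem detect_specialty_from_icd10_spec : Claim_equal_detect_specialty_from_icd10 := by
  unfold Claim_equal_detect_specialty_from_icd10 Spec_detect_specialty_from_icd10
  intro s _
  unfold detect_specialty_from_icd10 detect_specialty_from_icd10_alt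
  by_cases hs : s = ""
  · simp [hs]
  · simp only [if_neg hs]
    rw [foldA spData [] _ keys_nodup (by intro sp _; rfl), List.nil_append, A_filter_eq]
    exact core (PySem.Str.strip (PySem.Str.upper s)) _ rfl
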